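-- pv_equiv track=rewrite | github.com/xnoubis/wheel | rosetta_phase2_engine.py | compute_fractal_depth
-- ===== SOURCE A (Python) =====
-- def compute_fractal_depth(step: int) -> int:
--     """Folding depth at current step"""
--     if step <= 0:
--         return 0
--     depth = 0
--     while step % 2 == 0:
--         step //= 2
--         depth += 1
--     return depth
-- ===== SOURCE B (Python) =====
-- def compute_fractal_depth(step: int) -> int:
--     """Folding depth at current step"""
--     if step <= 0:
--         return 0
--     return (step & -step).bit_length() - 1
-- ===== Notes on version B (the rewrite author's own statement) =====
-- stated objective: idiomatic
-- what changed: Replaces the per-bit while loop with the closed-form bit trick (step & -step).bit_length() - 1, which isolates the lowest set bit and reads off its position without iterating.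
import Mathlib
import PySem

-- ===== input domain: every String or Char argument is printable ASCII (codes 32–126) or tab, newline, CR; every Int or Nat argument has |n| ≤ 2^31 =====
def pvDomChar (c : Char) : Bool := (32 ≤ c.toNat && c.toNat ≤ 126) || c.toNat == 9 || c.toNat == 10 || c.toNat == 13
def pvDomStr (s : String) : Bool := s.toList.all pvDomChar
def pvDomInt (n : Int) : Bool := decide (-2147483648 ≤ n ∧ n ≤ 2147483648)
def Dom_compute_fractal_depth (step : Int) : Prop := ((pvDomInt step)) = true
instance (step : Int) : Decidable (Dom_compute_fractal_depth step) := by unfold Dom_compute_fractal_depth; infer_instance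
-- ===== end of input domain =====

-- B replaces A's per-bit while loop with the closed-form bit trick (step & -step).bit_length() - 1 (idiomatic).


-- ===== PORT A =====
-- A's while loop: 'while step % 2 == 0: step //= 2; depth += 1'. The loop is only
-- entered with step > 0 and positivity is preserved, so the extra '0 < s' conjunct
-- (needed only for Lean termination) never changes the loop condition on reachable states.
def cfdLoop (s : Nat) (depth : Int) : Int :=
  if s % 2 = 0 ∧ 0 < s then cfdLoop (s / 2) (depth + 1) else depth
termination_by s
decreasing_by omega

def compute_fractal_depth (step : Int) : Int :=
  if step ≤ 0 then 0 else cfdLoop step.toNat 0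

-- ===== PORT B =====
-- Python's int.bit_length(): number of bits of |n|, 0 for 0 (exact on our use: n ≥ 1).
def pyBitLength (n : Int) : Int := if n = 0 then 0 else ((Nat.log2 n.natAbs : Nat) : Int) + 1

-- '(step & -step).bit_length() - 1'; Int.land is Python's & (two's complement).
def compute_fractal_depth_alt (step : Int) : Int :=
  if step ≤ 0 then 0 else pyBitLength (Int.land step (-step)) - 1

-- ===== PRECONDITION & SPEC =====
def Spec_compute_fractal_depth (step : Int) (out : Int) : Prop := out = compute_fractal_depth_alt step
instance (step : Int) (out : Int) : Decidable (Spec_compute_fractal_depth step out) := by unfold Spec_compute_fractal_depth; infer_instance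

-- ===== CLAIM (what is proved, stated in full; the proofs are below) =====
def Claim_equal_compute_fractal_depth : Prop := ∀ (step : Int), Dom_compute_fractal_depth step → Spec_compute_fractal_depth step (compute_fractal_depth step)

-- ===== LEMMAS AND PROOFS =====

-- A's loop counts the exponent of 2: cfdLoop (2^k * m) d = d + k for odd m.
theorem cfdLoop_pow (k : Nat) : ∀ (m : Nat) (d : Int), m % 2 = 1 → cfdLoop (2 ^ k * m) d = d + k := by
  induction k with
  | zero =>
    intro m d hm
    rw [cfdLoop]
    simp [hm]
  | succ k ih =>
    intro m d hm
    rw [cfdLoop]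
    have hpos : 0 < 2 ^ (k + 1) * m := by
      have hm1 : 0 < m := by omega
      positivity
    have heven : (2 ^ (k + 1) * m) % 2 = 0 := by
      have : 2 ∣ 2 ^ (k + 1) * m := Dvd.dvd.mul_right ⟨2 ^ k, by ring⟩ m
      omega
    have hdiv : (2 ^ (k + 1) * m) / 2 = 2 ^ k * m := by
      have h : 2 ^ (k + 1) * m = 2 * (2 ^ k * m) := by ring
      rw [h, Nat.mul_div_cancel_left _ (by norm_num)]
    rw [if_pos ⟨heven, hpos⟩, hdiv, ih m (d + 1) hm]
    push_cast
    ring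

-- bit i of (m - 1) for odd m: bit 0 flips to false, all higher bits unchanged.
theorem testBit_pred_odd (m : Nat) (hm : m % 2 = 1) :
    ∀ i, (m - 1).testBit i = if i = 0 then false else m.testBit i := by
  intro i
  cases i with
  | zero =>
    simp [Nat.testBit_zero]
    omega
  | succ j =>
    have h2 : (m - 1) / 2 = m / 2 := by omega
    simp [Nat.testBit_succ, h2]

-- the key bit identity: n & ~(n-1) = 2^(2-adic valuation of n), for n = 2^k * m, m odd.
theorem ldiff_pred (k : Nat) : ∀ (m : Nat), m % 2 = 1 →
    Nat.ldiff (2 ^ k * m) (2 ^ k * m - 1) = 2 ^ k := by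
  induction k with
  | zero =>
    intro m hm
    apply Nat.eq_of_testBit_eq
    intro i
    rw [Nat.testBit_ldiff, Nat.testBit_two_pow]
    simp only [pow_zero, one_mul]
    rw [testBit_pred_odd m hm i]
    cases i with
    | zero => simp [Nat.testBit_zero]; omega
    | succ j => simp
  | succ k ih =>
    intro m hm
    have hpos : 0 < 2 ^ k * m := by
      have hm1 : 0 < m := by omega
      positivity
    have hs : 2 ^ (k + 1) * m = 2 * (2 ^ k * m) := by ring
    have hs1 : 2 ^ (k + 1) * m - 1 = 2 * (2 ^ k * m - 1) + 1 := by omega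
    apply Nat.eq_of_testBit_eq
    intro i
    rw [Nat.testBit_ldiff, Nat.testBit_two_pow]
    cases i with
    | zero =>
      have : (2 ^ (k + 1) * m).testBit 0 = false := by
        rw [Nat.testBit_zero]
        simp [hs, Nat.mul_mod_right]
      simp [this]
    | succ j =>
      have h1 : (2 ^ (k + 1) * m).testBit (j + 1) = (2 ^ k * m).testBit j := by
        rw [Nat.testBit_succ, hs, Nat.mul_div_cancel_left _ (by norm_num)]
      have h2 : (2 ^ (k + 1) * m - 1).testBit (j + 1) = (2 ^ k * m - 1).testBit j := by
        rw [Nat.testBit_succ, hs1]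
        congr 1
        omega
      rw [h1, h2, ← Nat.testBit_ldiff, ih m hm, Nat.testBit_two_pow]
      simp

-- Int.land on a positive int and its negation reduces to Nat.ldiff n (n-1).
theorem land_neg_succ (n : Nat) :
    Int.land (Int.ofNat (n + 1)) (-(Int.ofNat (n + 1))) = Int.ofNat (Nat.ldiff (n + 1) n) := rfl

-- ===== VERDICT (by name: the statement is the Claim_ definition above) =====
theorem compute_fractal_depth_spec : Claim_equal_compute_fractal_depth := by
  intro step _
  unfold Spec_compute_fractal_depth compute_fractal_depth compute_fractal_depth_alt
  by_cases hle : step ≤ 0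
  · simp [hle]
  · rw [if_neg hle, if_neg hle]
    have hpos : 0 < step := lt_of_not_ge hle
    obtain ⟨n, rfl⟩ : ∃ n : Nat, step = Int.ofNat (n + 1) := by
      rcases step with (_ | n) | n
      · exact absurd hpos (by decide)
      · exact ⟨n, rfl⟩
      · exact absurd hpos (by omega)
    obtain ⟨k, m, hm, heq⟩ := Nat.exists_eq_pow_mul_and_not_dvd (n := n + 1) (by omega) 2 (by norm_num)
    have hmo : m % 2 = 1 := by
      rcases Nat.mod_two_eq_zero_or_one m with h | h
      · exact absurd (Nat.dvd_of_mod_eq_zero h) hm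
      · exact h
    have htoNat : (Int.ofNat (n + 1)).toNat = 2 ^ k * m := by
      simpa using heq
    rw [htoNat, cfdLoop_pow k m 0 hmo, land_neg_succ n]
    have hld : Nat.ldiff (n + 1) n = 2 ^ k := by
      have := ldiff_pred k m hmo
      rw [← heq] at this
      simpa using this
    rw [hld]
    unfold pyBitLength
    rw [if_neg (by simp)]
    simp
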